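-- pv_equiv track=rewrite | github.com/cuhksz-nlp/ASA-WD | data_utils.py | sentence2aspect
-- ===== SOURCE A (Python) =====
-- def sentence2aspect(seq_len, aspect_indices,ret_sentence,pos_length):
--     ret_aspect = [[0] * seq_len for _ in range(seq_len)]
--     ret_whole = ret_sentence.copy()
--     position = pos_length
--     for index, af in enumerate(aspect_indices):
--         if af == 1:
--             position += 1 # [SEP] or next
--             ret_aspect[position] = ret_sentence[index]
--             ret_whole[position] = ret_sentence[index]
--     return ret_aspect, ret_whole
-- ===== SOURCE B (Python) =====
-- def sentence2aspect(seq_len, aspect_indices, ret_sentence, pos_length):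
--     mapping = {}
--     position = pos_length
--     for index, af in enumerate(aspect_indices):
--         if af == 1:
--             position += 1
--             mapping[position] = index
--     ret_aspect = [ret_sentence[mapping[r]] if r in mapping else [0] * seq_len
--                   for r in range(seq_len)]
--     ret_whole = [ret_sentence[mapping[r]] if r in mapping else ret_sentence[r]
--                  for r in range(len(ret_sentence))]
--     return ret_aspect, ret_whole
-- ===== Notes on version B (the rewrite author's own statement) =====
-- stated objective: alternative
-- what changed: B replaces A's allocate-then-mutate in-place loop by one pass that builds a position-to-source-index table and then constructs both outputs directly with comprehensions over the index ranges.
import Mathlib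
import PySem

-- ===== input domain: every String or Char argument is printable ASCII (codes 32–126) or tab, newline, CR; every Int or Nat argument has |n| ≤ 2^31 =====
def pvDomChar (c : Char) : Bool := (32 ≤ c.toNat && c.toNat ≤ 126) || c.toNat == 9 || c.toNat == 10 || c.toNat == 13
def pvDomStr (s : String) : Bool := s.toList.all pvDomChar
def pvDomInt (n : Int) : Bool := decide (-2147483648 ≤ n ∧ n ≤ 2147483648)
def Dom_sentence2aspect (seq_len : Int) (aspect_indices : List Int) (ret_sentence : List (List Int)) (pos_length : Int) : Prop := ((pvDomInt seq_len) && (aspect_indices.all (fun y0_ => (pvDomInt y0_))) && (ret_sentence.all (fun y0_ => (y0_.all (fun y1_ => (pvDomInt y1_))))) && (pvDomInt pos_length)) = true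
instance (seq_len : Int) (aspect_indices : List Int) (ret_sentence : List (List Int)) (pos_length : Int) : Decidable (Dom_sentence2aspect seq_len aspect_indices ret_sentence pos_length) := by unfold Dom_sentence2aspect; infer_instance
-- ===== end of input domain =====

-- B replaces A's allocate-then-mutate in-place loop by one pass that builds a position→source-index
-- table and two comprehensions that construct the outputs directly (objective: alternative
-- structure, same cost). Pre_ excludes (besides A's IndexError inputs) the corner where a row is
-- assigned to a negative position: there A wraps to an end-relative slot while B's comprehensions
-- ignore the position; neither placement is a specified behaviour of a negative row position.

-- ===== PORT A =====
-- loop body of A: on af == 1, position += 1 and both arrays get ret_sentence[index] at position.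
-- pySetD / pyGetD are exact wherever Python indexing succeeds (including negative in-range
-- indices); their default branches are only reached where Python raises IndexError, which
-- Pre_sentence2aspect excludes.
def s2aStep (rs : List (List Int)) (st : List (List Int) × List (List Int) × Int) (p : Int × Int) : List (List Int) × List (List Int) × Int :=
  if p.2 == 1 then
    (PySem.List.pySetD st.1 (st.2.2 + 1) (PySem.List.pyGetD rs p.1 []),
     PySem.List.pySetD st.2.1 (st.2.2 + 1) (PySem.List.pyGetD rs p.1 []),
     st.2.2 + 1)
  else st

def sentence2aspect (seq_len : Int) (aspect_indices : List Int) (ret_sentence : List (List Int)) (pos_length : Int) : List (List Int) × List (List Int) :=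
  -- ret_aspect = [[0] * seq_len for _ in range(seq_len)]  (negative seq_len gives [])
  let ret_aspect := List.replicate seq_len.toNat (List.replicate seq_len.toNat (0 : Int))
  let fin := (PySem.List.enumerate aspect_indices 0).foldl (s2aStep ret_sentence) (ret_aspect, ret_sentence, pos_length)
  (fin.1, fin.2.1)

-- ===== PORT B =====
-- B's first pass: mapping[position] = index for every af == 1
def s2aMapStep (st : PySem.Dict Int Int × Int) (p : Int × Int) : PySem.Dict Int Int × Int :=
  if p.2 == 1 then (st.1.insert (st.2 + 1) p.1, st.2 + 1) else st

def sentence2aspect_alt (seq_len : Int) (aspect_indices : List Int) (ret_sentence : List (List Int)) (pos_length : Int) : List (List Int) × List (List Int) :=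
  let mp := ((PySem.List.enumerate aspect_indices 0).foldl s2aMapStep (PySem.Dict.empty, pos_length)).1
  let ret_aspect := (PySem.List.pyRange 0 seq_len 1).map (fun r =>
    match mp.get? r with
    | some i => PySem.List.pyGetD ret_sentence i []
    | none => List.replicate seq_len.toNat (0 : Int))
  let ret_whole := (PySem.List.pyRange 0 (ret_sentence.length : Int) 1).map (fun r =>
    match mp.get? r with
    | some i => PySem.List.pyGetD ret_sentence i []
    | none => PySem.List.pyGetD ret_sentence r [])
  (ret_aspect, ret_whole)

-- ===== PRECONDITION & SPEC =====
-- Pre_ excludes (a) exactly the inputs where Python A raises an IndexError (an af == 1 index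
-- outside ret_sentence, or a written position outside both arrays), and (b) the defensible corner
-- where some af == 1 targets a negative position pos_length+1 < 0: A then stores the row at a
-- Python negative-index wraparound slot and B ignores it — no caller intends a negative row
-- position, so neither value is specified; Pre_ keeps only nonnegative positions.
def Pre_sentence2aspect (seq_len : Int) (aspect_indices : List Int) (ret_sentence : List (List Int)) (pos_length : Int) : Prop :=
  (∀ i ∈ List.range aspect_indices.length, aspect_indices.getD i 0 = 1 → i < ret_sentence.length) ∧
  (aspect_indices.count 1 = 0 ∨
    (0 ≤ pos_length + 1 ∧
     pos_length + (aspect_indices.count 1 : Int) < min ((seq_len.toNat : Int)) ((ret_sentence.length : Int))))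
instance (seq_len : Int) (aspect_indices : List Int) (ret_sentence : List (List Int)) (pos_length : Int) : Decidable (Pre_sentence2aspect seq_len aspect_indices ret_sentence pos_length) := by unfold Pre_sentence2aspect; infer_instance

def pvWitness_sentence2aspect : Int × List Int × List (List Int) × Int := (2, [1], [[5, 6], [7, 8]], -1)

def Spec_sentence2aspect (seq_len : Int) (aspect_indices : List Int) (ret_sentence : List (List Int)) (pos_length : Int) (out : List (List Int) × List (List Int)) : Prop := out = sentence2aspect_alt seq_len aspect_indices ret_sentence pos_length
instance (seq_len : Int) (aspect_indices : List Int) (ret_sentence : List (List Int)) (pos_length : Int) (out : List (List Int) × List (List Int)) : Decidable (Spec_sentence2aspect seq_len aspect_indices ret_sentence pos_length out) := by unfold Spec_sentence2aspect; infer_instance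

-- ===== CLAIM (what is proved, stated in full; the proof is below) =====
def Claim_equal_sentence2aspect : Prop := ∀ (seq_len : Int) (aspect_indices : List Int) (ret_sentence : List (List Int)) (pos_length : Int), Dom_sentence2aspect seq_len aspect_indices ret_sentence pos_length → Pre_sentence2aspect seq_len aspect_indices ret_sentence pos_length → Spec_sentence2aspect seq_len aspect_indices ret_sentence pos_length (sentence2aspect seq_len aspect_indices ret_sentence pos_length)

-- ===== LEMMAS AND PROOFS =====

def s2aWrites : List Int → Int → Int → List (Int × Int)
  | [], _, _ => []
  | af :: rest, idx, pos =>
    if af == 1 then (pos + 1, idx) :: s2aWrites rest (idx + 1) (pos + 1)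
    else s2aWrites rest (idx + 1) pos

def s2aSet (rs : List (List Int)) (a : List (List Int)) (pi : Int × Int) : List (List Int) :=
  PySem.List.pySetD a pi.1 (PySem.List.pyGetD rs pi.2 [])

theorem s2aWrites_fst_bounds : ∀ (l : List Int) (idx pos : Int) (p : Int × Int),
    p ∈ s2aWrites l idx pos → pos + 1 ≤ p.1 ∧ p.1 ≤ pos + (l.count 1 : Int) := by
  intro l
  induction l with
  | nil => intro idx pos p hp; simp [s2aWrites] at hp
  | cons af rest ih =>
    intro idx pos p hp
    by_cases h : af = 1
    · simp only [s2aWrites, h, BEq.rfl, if_true, List.mem_cons] at hp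
      rcases hp with rfl | hp
      · simp [h]
      · have := ih (idx + 1) (pos + 1) p hp
        simp [h]; omega
    · have hb : (af == 1) = false := by simp [h]
      simp only [s2aWrites, hb, if_false] at hp
      have := ih (idx + 1) pos p hp
      have hc : List.count 1 (af :: rest) = List.count 1 rest := by
        simp [List.count_cons, hb]
      rw [hc]; omega

theorem s2aWrites_pairwise : ∀ (l : List Int) (idx pos : Int),
    (s2aWrites l idx pos).Pairwise (fun a b => a.1 < b.1) := by
  intro l
  induction l with
  | nil => intro idx pos; simp [s2aWrites]
  | cons af rest ih =>
    intro idx pos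
    by_cases h : af = 1
    · simp only [s2aWrites, h, BEq.rfl, if_true]
      refine List.pairwise_cons.mpr ⟨?_, ih (idx + 1) (pos + 1)⟩
      intro p hp
      have := s2aWrites_fst_bounds rest (idx + 1) (pos + 1) p hp
      omega
    · have hb : (af == 1) = false := by simp [h]
      simpa only [s2aWrites, hb, if_false] using ih (idx + 1) pos

theorem lookup_none_of_not_mem_fst {rest : List (Int × Int)} {q : Int}
    (hp : q ∉ rest.map Prod.fst) : rest.lookup q = none := by
  rw [List.lookup_eq_none_iff]
  intro p hpm
  simp only [bne_iff_ne, ne_eq]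
  intro he
  exact hp (he ▸ List.mem_map_of_mem hpm)

theorem get?_foldl_insert_lookup : ∀ (ws : List (Int × Int)) (d : PySem.Dict Int Int) (r : Int),
    (ws.map Prod.fst).Nodup →
    (ws.foldl (fun dd pi => dd.insert pi.1 pi.2) d).get? r =
      (match ws.lookup r with | some i => some i | none => d.get? r) := by
  intro ws
  induction ws with
  | nil => intro d r _; simp
  | cons p rest ih =>
    intro d r hnd
    rcases p with ⟨k, v⟩
    rw [List.map_cons] at hnd
    obtain ⟨hp, hnd'⟩ := List.nodup_cons.mp hnd
    simp only [List.foldl_cons]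
    rw [ih _ r hnd']
    by_cases hr : r = k
    · subst hr
      have hlk : rest.lookup r = none :=
        lookup_none_of_not_mem_fst (by simpa using hp)
      simp [List.lookup_cons, hlk, PySem.Dict.get?_insert]
    · have : (r == k) = false := by simp [hr]
      simp [List.lookup_cons, this, PySem.Dict.get?_insert, hr]

theorem s2a_foldA (rs : List (List Int)) : ∀ (l : List Int) (idx : Int) (asp wh : List (List Int)) (pos : Int),
    (PySem.List.enumerate l idx).foldl (s2aStep rs) (asp, wh, pos) =
      ((s2aWrites l idx pos).foldl (s2aSet rs) asp,
       (s2aWrites l idx pos).foldl (s2aSet rs) wh,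
       pos + (l.count 1 : Int)) := by
  intro l
  induction l with
  | nil => intro idx asp wh pos; simp [s2aWrites, PySem.List.enumerate]
  | cons af rest ih =>
    intro idx asp wh pos
    rw [PySem.List.enumerate_cons]
    by_cases h : af = 1
    · simp only [List.foldl_cons, s2aStep, s2aWrites, h, BEq.rfl, if_true]
      rw [ih]
      simp [s2aSet, List.count_cons]
      omega
    · have hb : (af == 1) = false := by simp [h]
      simp only [List.foldl_cons, s2aStep, s2aWrites, hb, if_false]
      rw [ih]
      have hc : List.count 1 (af :: rest) = List.count 1 rest := by
        simp [List.count_cons, hb]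
      rw [hc]; simp

theorem s2a_foldB : ∀ (l : List Int) (idx : Int) (d : PySem.Dict Int Int) (pos : Int),
    (PySem.List.enumerate l idx).foldl s2aMapStep (d, pos) =
      ((s2aWrites l idx pos).foldl (fun dd pi => dd.insert pi.1 pi.2) d,
       pos + (l.count 1 : Int)) := by
  intro l
  induction l with
  | nil => intro idx d pos; simp [s2aWrites, PySem.List.enumerate]
  | cons af rest ih =>
    intro idx d pos
    rw [PySem.List.enumerate_cons]
    by_cases h : af = 1
    · simp only [List.foldl_cons, s2aMapStep, s2aWrites, h, BEq.rfl, if_true]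
      rw [ih]
      simp [List.count_cons]
      omega
    · have hb : (af == 1) = false := by simp [h]
      simp only [List.foldl_cons, s2aMapStep, s2aWrites, hb, if_false]
      rw [ih]
      have hc : List.count 1 (af :: rest) = List.count 1 rest := by
        simp [List.count_cons, hb]
      rw [hc]; simp

theorem length_foldl_s2aSet (rs : List (List Int)) : ∀ (ws : List (Int × Int)) (base : List (List Int)),
    (ws.foldl (s2aSet rs) base).length = base.length := by
  intro ws
  induction ws with
  | nil => intro base; rfl
  | cons p rest ih =>
    intro base
    simp only [List.foldl_cons]
    rw [ih, s2aSet, PySem.List.length_pySetD]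

theorem getElem?_foldl_s2aSet (rs : List (List Int)) : ∀ (ws : List (Int × Int)) (base : List (List Int)) (k : Nat),
    k < base.length →
    (ws.map Prod.fst).Nodup →
    (∀ p ∈ ws, 0 ≤ p.1 ∧ p.1 < (base.length : Int)) →
    (ws.foldl (s2aSet rs) base)[k]? =
      (match ws.lookup (k : Int) with
       | some i => some (PySem.List.pyGetD rs i [])
       | none => base[k]?) := by
  intro ws
  induction ws with
  | nil => intro base k hk _ _; simp
  | cons p rest ih =>
    intro base k hk hnd hrange
    rcases p with ⟨q, i⟩
    rw [List.map_cons] at hnd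
    obtain ⟨hp, hnd'⟩ := List.nodup_cons.mp hnd
    obtain ⟨hq0, hqlt⟩ := hrange (q, i) (List.mem_cons_self ..)
    simp only [List.foldl_cons]
    have hset : s2aSet rs base (q, i) = base.set q.toNat (PySem.List.pyGetD rs i []) :=
      PySem.List.pySetD_of_nonneg base _ hq0
    have hlen : (base.set q.toNat (PySem.List.pyGetD rs i [])).length = base.length := by simp
    rw [hset, ih _ k (by omega) hnd'
        (by intro p hpmem; have := hrange p (List.mem_cons_of_mem _ hpmem); omega)]
    by_cases hr : (k : Int) = q
    · have hkq : q.toNat = k := by omega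
      have hlk : rest.lookup q = none :=
        lookup_none_of_not_mem_fst (by simpa using hp)
      simp [List.lookup_cons, hr, hlk, List.getElem?_set, hkq, hk]
    · have hbe : ((k : Int) == q) = false := by simp [hr]
      have hne : q.toNat ≠ k := by omega
      simp only [List.lookup_cons, hbe]
      cases hlk : rest.lookup (k : Int) with
      | some j => simp
      | none => simp [List.getElem?_set, hne]

theorem s2a_main : ∀ (sl : Int) (asp : List Int) (rs : List (List Int)) (pl : Int),
    Pre_sentence2aspect sl asp rs pl →
    sentence2aspect sl asp rs pl = sentence2aspect_alt sl asp rs pl := by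
  intro sl asp rs pl hpre
  have hkey : ∀ p ∈ s2aWrites asp 0 pl,
      0 ≤ p.1 ∧ p.1 < min ((sl.toNat : Int)) ((rs.length : Int)) := by
    intro p hp
    have hb := s2aWrites_fst_bounds asp 0 pl p hp
    rcases hpre.2 with h0 | ⟨hlo, hhi⟩
    · omega
    · omega
  have hnodup : ((s2aWrites asp 0 pl).map Prod.fst).Nodup :=
    List.pairwise_map.mpr ((s2aWrites_pairwise asp 0 pl).imp fun h => ne_of_lt h)
  simp only [sentence2aspect, sentence2aspect_alt]
  rw [s2a_foldA rs asp 0 _ _ pl, s2a_foldB asp 0 _ pl]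
  have hrange_eq : PySem.List.pyRange 0 sl 1 = PySem.List.pyRange 0 ((sl.toNat : Int)) 1 := by
    have harg : (sl - 0).toNat = (((sl.toNat : Int)) - 0).toNat := by omega
    rw [PySem.List.pyRange_one, PySem.List.pyRange_one, harg]
  refine Prod.ext ?_ ?_ <;> dsimp only
  · rw [hrange_eq]
    apply List.ext_getElem?
    intro i
    by_cases hi : i < sl.toNat
    · rw [getElem?_foldl_s2aSet rs _ _ i (by simp [hi]) hnodup
        (by intro p hp; have := hkey p hp; simp; omega)]
      rw [PySem.List.getElem?_map_pyRange_zero _ sl.toNat i hi]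
      rw [get?_foldl_insert_lookup _ _ _ hnodup]
      cases hl : (s2aWrites asp 0 pl).lookup (i : Int) with
      | some j => simp [hl]
      | none => simp [hl, PySem.Dict.get?_empty, List.getElem?_replicate, hi]
    · rw [List.getElem?_eq_none (by rw [length_foldl_s2aSet]; simp; omega)]
      rw [List.getElem?_eq_none (by simp [PySem.List.length_pyRange_one]; omega)]
  · apply List.ext_getElem?
    intro i
    by_cases hi : i < rs.length
    · rw [getElem?_foldl_s2aSet rs _ _ i hi hnodup
        (by intro p hp; have := hkey p hp; omega)]
      rw [PySem.List.getElem?_map_pyRange_zero _ rs.length i hi]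
      rw [get?_foldl_insert_lookup _ _ _ hnodup]
      cases hl : (s2aWrites asp 0 pl).lookup (i : Int) with
      | some j => simp [hl]
      | none =>
        simp [hl, PySem.Dict.get?_empty, PySem.List.pyGetD_natCast,
          List.getD_eq_getElem _ _ hi, List.getElem?_eq_getElem hi]
    · rw [List.getElem?_eq_none (by rw [length_foldl_s2aSet]; omega)]
      rw [List.getElem?_eq_none (by simp [PySem.List.length_pyRange_one]; omega)]

-- ===== VERDICT (by name: the statement is the Claim_ definition above) =====
theorem sentence2aspect_spec : Claim_equal_sentence2aspect := by
  intro seq_len aspect_indices ret_sentence pos_length _ hpre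
  exact s2a_main seq_len aspect_indices ret_sentence pos_length hpre
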